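-- pv_equiv track=rewrite | github.com/adilamanmohammed/FLT1 | prog1.py | nfsmbuild
-- ===== SOURCE A (Python) =====
-- def nfsmbuild(substring):
--     alphabets = sorted(set(substring))
--     states = list(range(1, len(substring) + 2))
--     transitions = [[set() for _ in alphabets + ['?']] for _ in states]
--
--     i = 0 #start state transitions
--     alphabetlen= len(alphabets)
--
--     # Iterate through each character in the alphabet
--     for idx in range(alphabetlen):
--         char = alphabets[idx]
--         # Transition to the second state if the character matches the first character of the substring
--         transitions[0][idx] = {1, 2} if char == substring[0] else {1}
--
--
--     #remaining states
--     # Loop through the substring, starting from the second character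
--     for i in range(1, len(substring)):
--         c = substring[i]  # Current character in substring
--         index = alphabets.index(c)  # Find the index of the character in alphabets
--         # Determine the next state, ensuring it doesn't exceed the number of states
--         nextstate = i + 2 if i + 1 < len(states) else len(states)
--         transitions[i][index].add(nextstate)  # Update the transition for the current state and character
--
--
--     # For each character in the alphabet, the final state transitions back to itself
--     for i in range(len(alphabets)):
--         transitions[-1][i] = {len(states)}
--
--
--     # Initialize epsilon transitions for each state
--     for i in range(len(transitions)):
--         transitions[i][-1] = set()
--
--
--     # Convert sets in transitions to strings and format the transitions
--     t = [
--         ['[{}]'.format(','.join(map(str, sorted(state)))) if state else '[]' for state in row]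
--         for row in transitions
--     ]
--
--     # Extend alphabet with epsilon represented as '?'
--     epsilon_alphabet = ' '.join(alphabets) + ' ?'
--
--     # String representation of the final states
--     final_states = ' '.join(map(str, [len(states)]))
--
--     # Assemble the NFSM output
--     output = epsilon_alphabet + "\n\n"
--     for row in t:
--         output += ' '.join(row) + "\n"
--     output += "\n" + final_states
--
--     return output
-- ===== SOURCE B (Python) =====
-- def nfsmbuild(substring):
--     alphabets = sorted(set(substring))
--     n = len(substring)
--
--     def column(c):
--         # transitions for character c, one cell per state 0..n, built top-down
--         col = ['[1,2]' if c == substring[0] else '[1]']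
--         for i in range(1, n):
--             col.append('[{}]'.format(i + 2) if c == substring[i] else '[]')
--         col.append('[{}]'.format(n + 1))
--         return col
--
--     cols = [column(c) for c in alphabets] + [['[]'] * (n + 1)]  # last is the epsilon column
--     rows = [' '.join(row) for row in zip(*cols)]
--     return ' '.join(alphabets) + ' ?\n\n' + '\n'.join(rows) + '\n\n' + str(n + 1)
-- ===== Notes on version B (the rewrite author's own statement) =====
-- stated objective: alternative
-- what changed: B builds the machine column-by-column: one independent transition column per alphabet character plus the constant epsilon column, then transposes with zip(*cols) to get the rows; A instead allocates a row-major table of mutable sets, fills it with four separate in-place update passes (start row, middle rows via alphabets.index, final row, epsilon column), and formats it afterwards.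
import Mathlib
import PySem

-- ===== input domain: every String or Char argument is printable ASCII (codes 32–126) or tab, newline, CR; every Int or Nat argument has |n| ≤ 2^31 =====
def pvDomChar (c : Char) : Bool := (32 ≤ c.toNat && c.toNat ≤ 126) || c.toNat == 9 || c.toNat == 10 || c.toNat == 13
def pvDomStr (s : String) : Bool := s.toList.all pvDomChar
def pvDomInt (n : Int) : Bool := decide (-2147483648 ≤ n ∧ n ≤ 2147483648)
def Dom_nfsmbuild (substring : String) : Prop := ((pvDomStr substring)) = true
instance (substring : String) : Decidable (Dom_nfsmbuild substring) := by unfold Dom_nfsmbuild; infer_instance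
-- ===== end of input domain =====

-- B builds the table column-by-column (one independent column per alphabet character plus the
-- constant epsilon column) and transposes with zip, instead of A's row-major table of mutable
-- sets filled by four in-place update passes and formatted afterwards (alternative).

-- ===== PORT A =====
def nfsmbuild (substring : String) : String :=
  let chars := substring.toList
  let alphabets := PySem.List.sorted (PySem.Set.ofList chars) (fun x => x) false
  let states : List Int := PySem.List.pyRange 1 ((chars.length : Int) + 2) 1
  let transitions : List (List (PySem.Set Int)) :=
    states.map (fun _ => (alphabets ++ ['?']).map (fun _ => (PySem.Set.empty : PySem.Set Int)))
  let alphabetlen := alphabets.length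
  -- for idx in range(alphabetlen): transitions[0][idx] = {1,2} if char == substring[0] else {1}
  let transitions := (PySem.List.pyRange 0 (alphabetlen : Int) 1).foldl (fun tr idx =>
      let char := PySem.List.pyGetD alphabets idx ' '
      PySem.List.pySetD tr 0 (PySem.List.pySetD (PySem.List.pyGetD tr 0 [])
        idx (if char = PySem.List.pyGetD chars 0 ' ' then ([1, 2] : PySem.Set Int) else ([1] : PySem.Set Int)))) transitions
  -- for i in range(1, len(substring)): transitions[i][index].add(nextstate)
  let transitions := (PySem.List.pyRange 1 (chars.length : Int) 1).foldl (fun tr i =>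
      let c := PySem.List.pyGetD chars i ' '
      let index : Int := ((PySem.List.index? alphabets c).getD 0 : Nat)
      let nextstate : Int := if i + 1 < (states.length : Int) then i + 2 else (states.length : Int)
      PySem.List.pySetD tr i (PySem.List.pySetD (PySem.List.pyGetD tr i [])
        index (PySem.Set.add (PySem.List.pyGetD (PySem.List.pyGetD tr i []) index []) nextstate))) transitions
  -- for i in range(len(alphabets)): transitions[-1][i] = {len(states)}
  let transitions := (PySem.List.pyRange 0 (alphabets.length : Int) 1).foldl (fun tr i =>
      PySem.List.pySetD tr (-1) (PySem.List.pySetD (PySem.List.pyGetD tr (-1) []) i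
        ([(states.length : Int)] : PySem.Set Int))) transitions
  -- for i in range(len(transitions)): transitions[i][-1] = set()
  let transitions := (PySem.List.pyRange 0 (transitions.length : Int) 1).foldl (fun tr i =>
      PySem.List.pySetD tr i (PySem.List.pySetD (PySem.List.pyGetD tr i []) (-1)
        (PySem.Set.empty : PySem.Set Int))) transitions
  let t : List (List (List Char)) := transitions.map (fun row => row.map (fun state =>
      if state.isEmpty then "[]".toList
      else '[' :: PySem.Chars.join [','] ((PySem.List.sorted state (fun x => x) false).map PySem.Int.toChars) ++ [']']))
  let epsilon_alphabet := PySem.Chars.join [' '] (alphabets.map (fun c => [c])) ++ [' ', '?']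
  let final_states := PySem.Chars.join [' '] ([((states.length : Int))].map PySem.Int.toChars)
  let output := epsilon_alphabet ++ ['\n', '\n']
  let output := t.foldl (fun out row => out ++ PySem.Chars.join [' '] row ++ ['\n']) output
  let output := output ++ ['\n'] ++ final_states
  String.ofList output

-- ===== PORT B =====
-- B-side helper: exact port of Python's zip(*cols) (truncates at the shortest column),
-- structural recursion on the first column.
def nfsmbuildZipAux {γ : Type} [Inhabited γ] (c : List γ) (rest : List (List γ)) : List (List γ) :=
  match c with
  | [] => []
  | x :: xs =>
    if rest.any List.isEmpty then []
    else (x :: rest.map List.headI) :: nfsmbuildZipAux xs (rest.map List.tail)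

def nfsmbuildZip {γ : Type} [Inhabited γ] (cols : List (List γ)) : List (List γ) :=
  match cols with
  | [] => []
  | c :: rest => nfsmbuildZipAux c rest

def nfsmbuild_alt (substring : String) : String :=
  let chars := substring.toList
  let alphabets := PySem.List.sorted (PySem.Set.ofList chars) (fun x => x) false
  let n := chars.length
  -- column(c): the cells for character c, states 0..n, built top-down
  let column : Char → List (List Char) := fun c =>
    ((if c = PySem.List.pyGetD chars 0 ' ' then "[1,2]".toList else "[1]".toList)
      :: (PySem.List.pyRange 1 (n : Int) 1).map (fun i =>
            if c = PySem.List.pyGetD chars i ' ' then '[' :: PySem.Int.toChars (i + 2) ++ [']'] else "[]".toList))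
    ++ ['[' :: PySem.Int.toChars ((n : Int) + 1) ++ [']']]
  let cols := alphabets.map column ++ [List.replicate (n + 1) "[]".toList]
  let rows := (nfsmbuildZip cols).map (PySem.Chars.join [' '])
  String.ofList (PySem.Chars.join [' '] (alphabets.map (fun c => [c])) ++ " ?\n\n".toList
    ++ PySem.Chars.join ['\n'] rows ++ "\n\n".toList ++ PySem.Int.toChars ((n : Int) + 1))

-- ===== PRECONDITION & SPEC =====
def Spec_nfsmbuild (substring : String) (out : String) : Prop := out = nfsmbuild_alt substring
instance (substring : String) (out : String) : Decidable (Spec_nfsmbuild substring out) := by unfold Spec_nfsmbuild; infer_instance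

-- ===== CLAIM (what is proved, stated in full; the proofs are below) =====
def Claim_equal_nfsmbuild : Prop := ∀ (substring : String), Dom_nfsmbuild substring → Spec_nfsmbuild substring (nfsmbuild substring)

-- ===== LEMMAS AND PROOFS =====

-- proof-side mirrors of A's computation (definitionally equal to the port's let-chain)
def alOf (cs : List Char) : List Char := PySem.List.sorted (PySem.Set.ofList cs) (fun x => x) false

def fmtCell (st : PySem.Set Int) : List Char :=
  if st.isEmpty then "[]".toList
  else '[' :: PySem.Chars.join [','] ((PySem.List.sorted st (fun x => x) false).map PySem.Int.toChars) ++ [']']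

def R0 (cs : List Char) : List (PySem.Set Int) := List.replicate ((alOf cs).length + 1) []

def idxA (cs : List Char) (i : Int) : Nat := (PySem.List.index? (alOf cs) (PySem.List.pyGetD cs i ' ')).getD 0

def predRow (cs : List Char) (j : Nat) : List (PySem.Set Int) :=
  if j = cs.length then
    (List.range (alOf cs).length).map (fun _ => ([(cs.length : Int) + 1] : PySem.Set Int)) ++ [[]]
  else if j = 0 then
    (List.range (alOf cs).length).map (fun k =>
      if (alOf cs).getD k ' ' = PySem.List.pyGetD cs 0 ' ' then ([1, 2] : PySem.Set Int) else ([1] : PySem.Set Int)) ++ [[]]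
  else
    (List.replicate (alOf cs).length ([] : PySem.Set Int)).set (idxA cs (j : Int)) [(j : Int) + 2] ++ [[]]

def loopA1 (cs : List Char) (tr : List (List (PySem.Set Int))) : List (List (PySem.Set Int)) :=
  (PySem.List.pyRange 0 (((alOf cs).length : Int)) 1).foldl (fun tr idx =>
    PySem.List.pySetD tr 0 (PySem.List.pySetD (PySem.List.pyGetD tr 0 []) idx
      (if PySem.List.pyGetD (alOf cs) idx ' ' = PySem.List.pyGetD cs 0 ' '
       then ([1, 2] : PySem.Set Int) else ([1] : PySem.Set Int)))) tr

def loopA2 (cs : List Char) (tr : List (List (PySem.Set Int))) : List (List (PySem.Set Int)) :=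
  (PySem.List.pyRange 1 ((cs.length : Int)) 1).foldl (fun tr i =>
    PySem.List.pySetD tr i (PySem.List.pySetD (PySem.List.pyGetD tr i [])
      ((idxA cs i : Nat) : Int)
      (PySem.Set.add (PySem.List.pyGetD (PySem.List.pyGetD tr i []) ((idxA cs i : Nat) : Int) [])
        (if i + 1 < (((PySem.List.pyRange 1 ((cs.length : Int) + 2) 1).length : Nat) : Int)
         then i + 2 else (((PySem.List.pyRange 1 ((cs.length : Int) + 2) 1).length : Nat) : Int))))) tr

def loopA3 (cs : List Char) (tr : List (List (PySem.Set Int))) : List (List (PySem.Set Int)) :=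
  (PySem.List.pyRange 0 (((alOf cs).length : Int)) 1).foldl (fun tr i =>
    PySem.List.pySetD tr (-1) (PySem.List.pySetD (PySem.List.pyGetD tr (-1) []) i
      ([(((PySem.List.pyRange 1 ((cs.length : Int) + 2) 1).length : Nat) : Int)] : PySem.Set Int))) tr

def loopA4 (tr : List (List (PySem.Set Int))) : List (List (PySem.Set Int)) :=
  (PySem.List.pyRange 0 ((tr.length : Int)) 1).foldl (fun tr i =>
    PySem.List.pySetD tr i (PySem.List.pySetD (PySem.List.pyGetD tr i []) (-1)
      (PySem.Set.empty : PySem.Set Int))) tr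

def tableA (cs : List Char) : List (List (PySem.Set Int)) :=
  loopA4 (loopA3 cs (loopA2 cs (loopA1 cs
    ((PySem.List.pyRange 1 ((cs.length : Int) + 2) 1).map
      (fun _ => (alOf cs ++ ['?']).map (fun _ => (PySem.Set.empty : PySem.Set Int)))))))

def outA (cs : List Char) : List Char :=
  let t := (tableA cs).map (fun row => row.map fmtCell)
  let epsilon := PySem.Chars.join [' '] ((alOf cs).map (fun c => [c])) ++ [' ', '?']
  let fin := PySem.Chars.join [' ']
    ([(((PySem.List.pyRange 1 ((cs.length : Int) + 2) 1).length : Nat) : Int)].map PySem.Int.toChars)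
  (t.foldl (fun out row => out ++ PySem.Chars.join [' '] row ++ ['\n']) (epsilon ++ ['\n', '\n'])) ++ ['\n'] ++ fin

-- proof-side row-major view of the rows B produces
def rowB (cs : List Char) (i : Int) : List Char :=
  let cells : List (List Char) :=
    if i = (cs.length : Int) then
      (alOf cs).map (fun _ => '[' :: PySem.Int.toChars ((cs.length : Int) + 1) ++ [']'])
    else if i = 0 then
      (alOf cs).map (fun c => if c = PySem.List.pyGetD cs 0 ' ' then "[1,2]".toList else "[1]".toList)
    else
      (alOf cs).map (fun c => if c = PySem.List.pyGetD cs i ' ' then '[' :: PySem.Int.toChars (i + 2) ++ [']'] else "[]".toList)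
  PySem.Chars.join [' '] (cells ++ ["[]".toList])

-- proof-side mirrors of B's computation
def colB (cs : List Char) (c : Char) : List (List Char) :=
  ((if c = PySem.List.pyGetD cs 0 ' ' then "[1,2]".toList else "[1]".toList)
    :: (PySem.List.pyRange 1 ((cs.length : Nat) : Int) 1).map (fun i =>
          if c = PySem.List.pyGetD cs i ' ' then '[' :: PySem.Int.toChars (i + 2) ++ [']'] else "[]".toList))
  ++ ['[' :: PySem.Int.toChars (((cs.length : Nat) : Int) + 1) ++ [']']]

def colsB (cs : List Char) : List (List (List Char)) :=
  (alOf cs).map (colB cs) ++ [List.replicate (cs.length + 1) "[]".toList]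

def outB (cs : List Char) : List Char :=
  PySem.Chars.join [' '] ((alOf cs).map (fun c => [c])) ++ " ?\n\n".toList
    ++ PySem.Chars.join ['\n'] ((nfsmbuildZip (colsB cs)).map (PySem.Chars.join [' ']))
    ++ "\n\n".toList ++ PySem.Int.toChars (((cs.length : Nat) : Int) + 1)

lemma nfsmbuild_eq (s : String) : nfsmbuild s = String.ofList (outA s.toList) := rfl
lemma nfsmbuild_alt_eq (s : String) : nfsmbuild_alt s = String.ofList (outB s.toList) := rfl

-- generic loop-shape lemmas
lemma foldl_length_eq {β δ : Type} (F : List β → δ → List β) (hF : ∀ t i, (F t i).length = t.length) :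
    ∀ (l : List δ) (tr : List β), (l.foldl F tr).length = tr.length := by
  intro l
  induction l with
  | nil => intro tr; rfl
  | cons x xs ih => intro tr; simpa [List.foldl_cons, hF] using ih (F tr x)

lemma pySetD_neg_one_append {γ : Type} (xs : List γ) (y v : γ) :
    PySem.List.pySetD (xs ++ [y]) (-1) v = xs ++ [v] := by
  simp [PySem.List.pySetD, PySem.List.pySet?, PySem.List.pyIdx?]

lemma foldl_set_rows_getD_aux {γ : Type} (g : Int → List γ → List γ) (d : List γ) :
    ∀ (k : Nat) (a b : Int) (tr : List (List γ)) (j : Nat), 0 ≤ a → (b - a).toNat = k →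
    ((PySem.List.pyRange a b 1).foldl
        (fun t i => PySem.List.pySetD t i (g i (PySem.List.pyGetD t i d))) tr).getD j d
      = if a ≤ (j : Int) ∧ (j : Int) < b ∧ j < tr.length then g (j : Int) (tr.getD j d)
        else tr.getD j d := by
  intro k
  induction k with
  | zero =>
    intro a b tr j ha hk
    rw [PySem.List.pyRange_one_eq_nil (by omega)]
    simp only [List.foldl_nil]
    have : ¬ (a ≤ (j : Int) ∧ (j : Int) < b ∧ j < tr.length) := by omega
    rw [if_neg this]
  | succ k ih =>
    intro a b tr j ha hk
    have hab : a < b := by omega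
    rw [PySem.List.pyRange_one_cons hab, List.foldl_cons]
    rw [ih (a + 1) b _ j (by omega) (by omega)]
    rw [PySem.List.length_pySetD]
    rw [PySem.List.pySetD_of_nonneg _ _ ha]
    by_cases hj : (j : Int) = a
    · have hja : j = a.toNat := by omega
      have h1 : ¬ (a + 1 ≤ (j : Int) ∧ (j : Int) < b ∧ j < tr.length) := by omega
      rw [if_neg h1]
      by_cases hlen : j < tr.length
      · rw [if_pos ⟨by omega, by omega, hlen⟩]
        subst hja
        rw [List.getD_eq_getElem _ _ (by simpa using hlen), List.getElem_set_self (by simpa using hlen)]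
        congr 1
        · omega
        · have ha2 : a = ((a.toNat : Nat) : Int) := by omega
          rw [ha2, PySem.List.pyGetD_natCast]
          rw [List.getD_eq_getElem?_getD, List.getD_eq_getElem?_getD, Int.toNat_natCast]
      · rw [if_neg (by omega)]
        have hge : tr.length ≤ j := by omega
        rw [List.getD_eq_getElem?_getD, List.getD_eq_getElem?_getD,
          List.getElem?_eq_none (by simpa using hge), List.getElem?_eq_none (by omega)]
    · have hne : a.toNat ≠ j := by omega
      have hset : (tr.set a.toNat (g a (PySem.List.pyGetD tr a d))).getD j d = tr.getD j d := by
        rw [List.getD_eq_getElem?_getD, List.getD_eq_getElem?_getD, List.getElem?_set_ne hne]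
      rw [hset]
      by_cases hin : a + 1 ≤ (j : Int) ∧ (j : Int) < b ∧ j < tr.length
      · rw [if_pos hin, if_pos ⟨by omega, hin.2⟩]
      · rw [if_neg hin, if_neg (by omega)]

lemma foldl_set_rows_getD {γ : Type} (g : Int → List γ → List γ) (d : List γ)
    (a b : Int) (tr : List (List γ)) (j : Nat) (ha : 0 ≤ a) :
    ((PySem.List.pyRange a b 1).foldl
        (fun t i => PySem.List.pySetD t i (g i (PySem.List.pyGetD t i d))) tr).getD j d
      = if a ≤ (j : Int) ∧ (j : Int) < b ∧ j < tr.length then g (j : Int) (tr.getD j d)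
        else tr.getD j d :=
  foldl_set_rows_getD_aux g d ((b - a).toNat) a b tr j ha rfl

lemma foldl_set_getD {γ : Type} (f : Int → List γ) (d : List γ)
    (a b : Int) (tr : List (List γ)) (j : Nat) (ha : 0 ≤ a) :
    ((PySem.List.pyRange a b 1).foldl (fun t i => PySem.List.pySetD t i (f i)) tr).getD j d
      = if a ≤ (j : Int) ∧ (j : Int) < b ∧ j < tr.length then f (j : Int) else tr.getD j d :=
  foldl_set_rows_getD (fun i _ => f i) d a b tr j ha

lemma pySetD_zero_cons {γ : Type} (y : γ) (ys : List γ) (v : γ) :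
    PySem.List.pySetD (y :: ys) 0 v = v :: ys := by
  rw [PySem.List.pySetD_of_nonneg _ _ (by omega)]
  rfl

lemma foldl_pySetD_zero {γ : Type} (g : Int → List γ → List γ) (d : List γ) :
    ∀ (l : List Int) (y : List γ) (ys : List (List γ)),
    l.foldl (fun t i => PySem.List.pySetD t 0 (g i (PySem.List.pyGetD t 0 d))) (y :: ys)
      = (l.foldl (fun r i => g i r) y) :: ys := by
  intro l
  induction l with
  | nil => intro y ys; rfl
  | cons i l ih =>
    intro y ys
    rw [List.foldl_cons, PySem.List.pyGetD_zero_cons, pySetD_zero_cons, ih, List.foldl_cons]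

lemma foldl_pySetD_last {γ : Type} (g : Int → List γ → List γ) (d : List γ) :
    ∀ (l : List Int) (ys : List (List γ)) (y : List γ),
    l.foldl (fun t i => PySem.List.pySetD t (-1) (g i (PySem.List.pyGetD t (-1) d))) (ys ++ [y])
      = ys ++ [l.foldl (fun r i => g i r) y] := by
  intro l
  induction l with
  | nil => intro ys y; rfl
  | cons i l ih =>
    intro ys y
    rw [List.foldl_cons, PySem.List.pyGetD_neg_one_append_singleton, pySetD_neg_one_append, ih,
      List.foldl_cons]

-- assembly lemmas
lemma foldl_out {β : Type} (f : β → List Char) (c : Char) :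
    ∀ (t : List β) (H : List Char),
    t.foldl (fun out row => out ++ f row ++ [c]) H = H ++ (t.map (fun r => f r ++ [c])).flatten := by
  intro t
  induction t with
  | nil => intro H; simp
  | cons x xs ih => intro H; rw [List.foldl_cons, ih, List.map_cons, List.flatten_cons]; simp

lemma flatten_join (c : Char) :
    ∀ (l : List (List Char)), l ≠ [] →
    (l.map (· ++ [c])).flatten = PySem.Chars.join [c] l ++ [c] := by
  intro l
  induction l with
  | nil => intro h; exact absurd rfl h
  | cons x xs ih =>
    intro _
    cases xs with
    | nil => simp [PySem.Chars.join_singleton]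
    | cons y ys =>
      rw [PySem.Chars.join_cons_cons, List.map_cons, List.flatten_cons, ih (by simp)]
      simp

lemma foldl_set_full {γ : Type} (f : Int → List γ) (e : List γ) (m : Nat) :
    (PySem.List.pyRange 0 (m : Int) 1).foldl (fun r i => PySem.List.pySetD r i (f i)) (List.replicate (m + 1) e)
      = (List.range m).map (fun (k : Nat) => f (k : Int)) ++ [e] := by
  apply List.ext_getElem
  · rw [foldl_length_eq _ (fun t i => PySem.List.length_pySetD t i _)]
    simp
  · intro j hj1 hj2
    have hlen : j < m + 1 := by
      rw [foldl_length_eq _ (fun t i => PySem.List.length_pySetD t i _)] at hj1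
      simpa using hj1
    rw [← List.getD_eq_getElem _ e hj1, ← List.getD_eq_getElem _ e hj2]
    rw [foldl_set_getD f e 0 (m : Int) _ j (by omega)]
    by_cases hjm : j < m
    · rw [if_pos ⟨by omega, by exact_mod_cast hjm, by simp; omega⟩]
      rw [List.getD_eq_getElem _ _ hj2, List.getElem_append_left (by simpa using hjm)]
      simp
    · have hj : j = m := by omega
      subst hj
      rw [if_neg (by omega)]
      rw [List.getD_replicate _ (by omega)]
      rw [List.getD_eq_getElem _ _ hj2]
      rw [List.getElem_append_right (by simp)]
      simp
lemma loopA2_length (cs : List Char) (tr : List (List (PySem.Set Int))) :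
    (loopA2 cs tr).length = tr.length :=
  foldl_length_eq _ (fun t i => PySem.List.length_pySetD t i _) _ tr
lemma loopA4_length (tr : List (List (PySem.Set Int))) :
    (loopA4 tr).length = tr.length :=
  foldl_length_eq _ (fun t i => PySem.List.length_pySetD t i _) _ tr

lemma loopA2_getD (cs : List Char) (tr : List (List (PySem.Set Int))) (j : Nat) :
    (loopA2 cs tr).getD j [] =
      if 1 ≤ (j : Int) ∧ (j : Int) < (cs.length : Int) ∧ j < tr.length then
        PySem.List.pySetD (tr.getD j []) ((idxA cs (j : Int) : Nat) : Int)
          (PySem.Set.add (PySem.List.pyGetD (tr.getD j []) ((idxA cs (j : Int) : Nat) : Int) [])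
            (if (j : Int) + 1 < (((PySem.List.pyRange 1 ((cs.length : Int) + 2) 1).length : Nat) : Int)
             then (j : Int) + 2
             else (((PySem.List.pyRange 1 ((cs.length : Int) + 2) 1).length : Nat) : Int)))
      else tr.getD j [] :=
  foldl_set_rows_getD
    (fun i row => PySem.List.pySetD row ((idxA cs i : Nat) : Int)
      (PySem.Set.add (PySem.List.pyGetD row ((idxA cs i : Nat) : Int) [])
        (if i + 1 < (((PySem.List.pyRange 1 ((cs.length : Int) + 2) 1).length : Nat) : Int)
         then i + 2
         else (((PySem.List.pyRange 1 ((cs.length : Int) + 2) 1).length : Nat) : Int))))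
    [] 1 (cs.length : Int) tr j (by omega)

lemma loopA4_getD (tr : List (List (PySem.Set Int))) (j : Nat) :
    (loopA4 tr).getD j [] =
      if 0 ≤ (j : Int) ∧ (j : Int) < (tr.length : Int) ∧ j < tr.length then
        PySem.List.pySetD (tr.getD j []) (-1) (PySem.Set.empty : PySem.Set Int)
      else tr.getD j [] :=
  foldl_set_rows_getD (fun _ row => PySem.List.pySetD row (-1) (PySem.Set.empty : PySem.Set Int))
    [] 0 (tr.length : Int) tr j (by omega)

lemma R0_getD (cs : List Char) (k : Nat) : (R0 cs).getD k [] = [] := by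
  rw [R0, List.getD_eq_getElem?_getD, List.getElem?_replicate]
  split <;> rfl

lemma set_add_nil {α : Type} [BEq α] (v : α) : PySem.Set.add ([] : PySem.Set α) v = [v] := by
  simp [PySem.Set.add, PySem.Set.contains]

lemma al_nodup (cs : List Char) : (alOf cs).Nodup :=
  (PySem.List.sorted_ofList_pairwise_lt cs).imp (fun h => ne_of_lt h)

lemma idxA_index? (cs : List Char) (j : Nat) (hj : j < cs.length) :
    PySem.List.index? (alOf cs) (PySem.List.pyGetD cs (j : Int) ' ') = some (idxA cs (j : Int)) := by
  have hmem : PySem.List.pyGetD cs (j : Int) ' ' ∈ alOf cs := by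
    rw [alOf, PySem.List.mem_sorted, PySem.Set.mem_ofList, PySem.List.pyGetD_natCast,
      List.getD_eq_getElem _ _ hj]
    exact List.getElem_mem hj
  obtain ⟨k, hk⟩ := Option.isSome_iff_exists.mp ((PySem.List.index?_isSome_iff _ _).mpr hmem)
  rw [idxA, hk]
  rfl

lemma idxA_lt (cs : List Char) (j : Nat) (hj : j < cs.length) :
    idxA cs (j : Int) < (alOf cs).length :=
  (PySem.List.getElem_of_index?_eq_some (idxA_index? cs j hj)).choose

lemma idxA_getElem (cs : List Char) (j : Nat) (hj : j < cs.length) :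
    (alOf cs)[idxA cs (j : Int)]'(idxA_lt cs j hj) = PySem.List.pyGetD cs (j : Int) ' ' :=
  (PySem.List.getElem_of_index?_eq_some (idxA_index? cs j hj)).choose_spec.1

lemma al_eq_iff (cs : List Char) (j : Nat) (hj : j < cs.length) (k : Nat) (hk : k < (alOf cs).length) :
    (alOf cs)[k]'hk = PySem.List.pyGetD cs (j : Int) ' ' ↔ k = idxA cs (j : Int) := by
  constructor
  · intro h
    exact (List.Nodup.getElem_inj_iff (al_nodup cs)).mp (h.trans (idxA_getElem cs j hj).symm)
  · intro h
    subst h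
    exact idxA_getElem cs j hj

lemma fmtCell_nil : fmtCell [] = "[]".toList := rfl

lemma fmtCell_singleton (x : Int) : fmtCell [x] = '[' :: PySem.Int.toChars x ++ [']'] := by
  rw [fmtCell, if_neg (by simp)]
  rw [PySem.List.sorted_eq_self_of_pairwise [x] (fun v => v) (by simp)]
  rw [List.map_singleton, PySem.Chars.join_singleton]

lemma predRow_last_unit (cs : List Char) (j : Nat) :
    PySem.List.pySetD (predRow cs j) (-1) (PySem.Set.empty : PySem.Set Int) = predRow cs j := by
  rw [predRow]
  split_ifs <;> rw [pySetD_neg_one_append] <;> rfl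

-- facts about the table
lemma table_eq (cs : List Char) (h : cs ≠ []) :
    tableA cs = (List.range (cs.length + 1)).map (predRow cs) := by
  have hN : 1 ≤ cs.length := List.length_pos_of_ne_nil h
  have hsl : (PySem.List.pyRange 1 ((cs.length : Int) + 2) 1).length = cs.length + 1 := by
    rw [PySem.List.length_pyRange_one]; omega
  have h0 : (PySem.List.pyRange 1 ((cs.length : Int) + 2) 1).map
      (fun _ => (alOf cs ++ ['?']).map (fun _ => (PySem.Set.empty : PySem.Set Int)))
      = List.replicate (cs.length + 1) (R0 cs) := by
    rw [List.map_const', hsl, List.map_const']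
    simp [R0, PySem.Set.empty]
  have h1 : loopA1 cs (List.replicate (cs.length + 1) (R0 cs))
      = predRow cs 0 :: List.replicate cs.length (R0 cs) := by
    rw [List.replicate_succ]
    refine Eq.trans (foldl_pySetD_zero (fun idx row => PySem.List.pySetD row idx
      (if PySem.List.pyGetD (alOf cs) idx ' ' = PySem.List.pyGetD cs 0 ' '
       then ([1, 2] : PySem.Set Int) else ([1] : PySem.Set Int))) []
      (PySem.List.pyRange 0 ((alOf cs).length : Int) 1) (R0 cs) (List.replicate cs.length (R0 cs))) ?_
    congr 1
    refine Eq.trans (foldl_set_full (fun idx =>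
      (if PySem.List.pyGetD (alOf cs) idx ' ' = PySem.List.pyGetD cs 0 ' '
       then ([1, 2] : PySem.Set Int) else ([1] : PySem.Set Int))) [] ((alOf cs).length)) ?_
    rw [predRow, if_neg (by omega), if_pos rfl]
    simp only [PySem.List.pyGetD_natCast]
  have h2 : loopA2 cs (predRow cs 0 :: List.replicate cs.length (R0 cs))
      = (List.range (cs.length + 1)).map (fun j =>
          if j = 0 then predRow cs 0 else if j < cs.length then predRow cs j else R0 cs) := by
    apply List.ext_getElem
    · rw [loopA2_length]; simp
    · intro j hj1 hj2
      have hjN : j < cs.length + 1 := by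
        rw [loopA2_length] at hj1; simpa using hj1
      rw [← List.getD_eq_getElem _ [] hj1, ← List.getD_eq_getElem _ [] hj2]
      rw [loopA2_getD]
      have hR : ((List.range (cs.length + 1)).map (fun j =>
          if j = 0 then predRow cs 0 else if j < cs.length then predRow cs j else R0 cs)).getD j []
          = if j = 0 then predRow cs 0 else if j < cs.length then predRow cs j else R0 cs := by
        rw [List.getD_eq_getElem _ _ hj2]
        simp
      rw [hR]
      by_cases hj0 : j = 0
      · subst hj0
        rw [if_neg (by omega), if_pos rfl]
        rfl
      · by_cases hjn : j < cs.length
        · have hT1 : (predRow cs 0 :: List.replicate cs.length (R0 cs)).getD j [] = R0 cs := by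
            cases j with
            | zero => omega
            | succ k =>
              rw [List.getD_cons_succ, List.getD_replicate _ (by omega)]
          rw [if_pos ⟨by omega, by exact_mod_cast hjn, by simp; omega⟩]
          rw [hT1, if_neg hj0, if_pos hjn]
          rw [PySem.List.pyGetD_natCast, R0_getD, set_add_nil]
          rw [PySem.List.pySetD_natCast]
          rw [hsl, if_pos (by exact_mod_cast (by omega : (j : Int) + 1 < (cs.length : Int) + 1))]
          rw [predRow, if_neg (by omega), if_neg hj0]
          rw [R0, List.replicate_succ']
          rw [List.set_append, if_pos (by simpa using idxA_lt cs j hjn)]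
        · rw [if_neg (by omega), if_neg hj0, if_neg hjn]
          obtain ⟨k, hk⟩ : ∃ k, j = k + 1 := ⟨j - 1, by omega⟩
          subst hk
          rw [List.getD_cons_succ, List.getD_replicate _ (by omega)]
  have hsplit : (List.range (cs.length + 1)).map (fun j =>
      if j = 0 then predRow cs 0 else if j < cs.length then predRow cs j else R0 cs)
      = ((List.range cs.length).map (fun j =>
          if j = 0 then predRow cs 0 else if j < cs.length then predRow cs j else R0 cs)) ++ [R0 cs] := by
    rw [List.range_succ, List.map_append, List.map_singleton, if_neg (by omega), if_neg (by omega)]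
  have h3 : ∀ ys : List (List (PySem.Set Int)), loopA3 cs (ys ++ [R0 cs]) = ys ++ [predRow cs cs.length] := by
    intro ys
    refine Eq.trans (foldl_pySetD_last (fun i row => PySem.List.pySetD row i
      ([(((PySem.List.pyRange 1 ((cs.length : Int) + 2) 1).length : Nat) : Int)] : PySem.Set Int)) []
      (PySem.List.pyRange 0 ((alOf cs).length : Int) 1) ys (R0 cs)) ?_
    congr 1
    refine congrArg (fun x => [x]) ?_
    refine Eq.trans (foldl_set_full (fun _ =>
      ([(((PySem.List.pyRange 1 ((cs.length : Int) + 2) 1).length : Nat) : Int)] : PySem.Set Int)) []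
      ((alOf cs).length)) ?_
    rw [predRow, if_pos rfl, hsl]
    push_cast
    rfl
  have hpre : (List.range cs.length).map (fun j =>
      if j = 0 then predRow cs 0 else if j < cs.length then predRow cs j else R0 cs)
      = (List.range cs.length).map (predRow cs) := by
    apply List.map_congr_left
    intro j hj
    rw [List.mem_range] at hj
    by_cases hj0 : j = 0
    · subst hj0; rw [if_pos rfl]
    · rw [if_neg hj0, if_pos hj]
  have hjoin : (List.range cs.length).map (predRow cs) ++ [predRow cs cs.length]
      = (List.range (cs.length + 1)).map (predRow cs) := by
    rw [List.range_succ, List.map_append, List.map_singleton]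
  have h4 : loopA4 ((List.range (cs.length + 1)).map (predRow cs))
      = (List.range (cs.length + 1)).map (predRow cs) := by
    apply List.ext_getElem
    · rw [loopA4_length]
    · intro j hj1 hj2
      have hjN : j < cs.length + 1 := by simpa using hj2
      rw [← List.getD_eq_getElem _ [] hj1, ← List.getD_eq_getElem _ [] hj2]
      rw [loopA4_getD]
      have hget : ((List.range (cs.length + 1)).map (predRow cs)).getD j [] = predRow cs j := by
        rw [List.getD_eq_getElem _ _ hj2]
        simp
      rw [hget]
      rw [if_pos ⟨by omega, by simp; omega, by simp; omega⟩]
      exact predRow_last_unit cs j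
  unfold tableA
  rw [h0, h1, h2, hsplit, h3, hpre, hjoin, h4]

lemma map_range_getD {α β : Type} (xs : List α) (h : α → β) (d : α) :
    (List.range xs.length).map (fun i => h (xs.getD i d)) = xs.map h := by
  apply List.ext_getElem
  · simp
  · intro i h1 h2
    simp only [List.getElem_map, List.getElem_range]
    rw [List.getD_eq_getElem _ _ (by simpa using h1)]

lemma rows_eq (cs : List Char) (h : cs ≠ []) :
    ((List.range (cs.length + 1)).map (predRow cs)).map (fun row => PySem.Chars.join [' '] (row.map fmtCell))
      = (PySem.List.pyRange 0 ((cs.length : Int) + 1) 1).map (rowB cs) := by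
  have hN : 1 ≤ cs.length := List.length_pos_of_ne_nil h
  have f12 : fmtCell [1, 2] = "[1,2]".toList := by decide
  have f1 : fmtCell [1] = "[1]".toList := by decide
  have hcast : ((cs.length : Int) + 1) = ((cs.length + 1 : Nat) : Int) := by push_cast; ring
  rw [hcast, PySem.List.pyRange_zero_nat, List.map_map, List.map_map]
  apply List.map_congr_left
  intro j hj
  rw [List.mem_range] at hj
  simp only [Function.comp]
  by_cases hjn : j = cs.length
  · subst hjn
    rw [predRow, if_pos rfl]
    simp only [rowB]
    rw [if_true]
    rw [List.map_append, List.map_map, List.map_singleton, fmtCell_nil]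
    congr 2
    · simp only [Function.comp_def, fmtCell_singleton]
      rw [List.map_const', List.map_const', List.length_range]
  · by_cases hj0 : j = 0
    · subst hj0
      rw [predRow, if_neg (by omega), if_pos rfl]
      simp only [rowB]
      rw [if_neg (by exact_mod_cast hjn), if_pos (by norm_num)]
      rw [List.map_append, List.map_map, List.map_singleton, fmtCell_nil]
      congr 2
      rw [← map_range_getD (alOf cs) (fun c =>
        if c = PySem.List.pyGetD cs 0 ' ' then "[1,2]".toList else "[1]".toList) ' ']
      apply List.map_congr_left
      intro k _
      simp only [Function.comp]
      rw [apply_ite fmtCell, f12, f1]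
    · rw [predRow, if_neg hjn, if_neg hj0]
      simp only [rowB]
      rw [if_neg (by exact_mod_cast hjn), if_neg (by exact_mod_cast hj0)]
      rw [List.map_append, List.map_singleton, fmtCell_nil]
      congr 2
      apply List.ext_getElem
      · simp
      · intro k hk1 hk2
        have hkm : k < (alOf cs).length := by simpa using hk2
        rw [List.getElem_map, List.getElem_map]
        rw [List.getElem_set, List.getElem_replicate]
        rw [apply_ite fmtCell, fmtCell_singleton, fmtCell_nil]
        by_cases hkk : k = idxA cs (j : Int)
        · rw [if_pos hkk.symm, if_pos ((al_eq_iff cs j (by omega) k hkm).mpr hkk)]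
        · rw [if_neg (fun hc => hkk hc.symm),
            if_neg (fun hc => hkk ((al_eq_iff cs j (by omega) k hkm).mp hc))]

-- ===== B-side lemmas: zip of equal-length columns is the row-major transpose =====
lemma zipAux_eq {γ : Type} [Inhabited γ] :
    ∀ (m : Nat) (c : List γ) (rest : List (List γ)), c.length = m → (∀ l ∈ rest, l.length = m) →
    nfsmbuildZipAux c rest
      = (List.range m).map (fun i => (c :: rest).map (fun col => col.getD i default)) := by
  intro m
  induction m with
  | zero =>
    intro c rest hc _
    rw [List.length_eq_zero_iff.mp hc]
    rfl
  | succ m ih =>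
    intro c rest hc hrest
    obtain ⟨x, xs, rfl⟩ : ∃ x xs, c = x :: xs := by
      cases c with
      | nil => simp at hc
      | cons x xs => exact ⟨x, xs, rfl⟩
    have hany : rest.any List.isEmpty = false := by
      rw [List.any_eq_false]
      intro l hl
      have := hrest l hl
      cases l with
      | nil => simp at this
      | cons a b => simp
    rw [nfsmbuildZipAux, hany]
    simp only [Bool.false_eq_true, if_false]
    rw [ih xs (rest.map List.tail) (by simpa using hc)
      (by intro l hl; obtain ⟨l', hl', rfl⟩ := List.mem_map.mp hl
          have := hrest l' hl'
          cases l' with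
          | nil => simp at this
          | cons a b => simpa using this)]
    rw [List.range_succ_eq_map, List.map_cons]
    congr 1
    · simp only [List.map_cons, List.getD_cons_zero]
      congr 1
      apply List.map_congr_left
      intro l hl
      have := hrest l hl
      cases l with
      | nil => simp at this
      | cons a b => simp
    · rw [List.map_map]
      apply List.map_congr_left
      intro i _
      simp only [Function.comp, List.map_cons, List.getD_cons_succ, List.map_map]
      congr 1
      apply List.map_congr_left
      intro l hl
      have := hrest l hl
      cases l with
      | nil => simp at this
      | cons a b => simp

lemma zip_eq {γ : Type} [Inhabited γ] (m : Nat) (c : List γ) (rest : List (List γ))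
    (hc : c.length = m) (hrest : ∀ l ∈ rest, l.length = m) :
    nfsmbuildZip (c :: rest)
      = (List.range m).map (fun i => (c :: rest).map (fun col => col.getD i default)) :=
  zipAux_eq m c rest hc hrest

lemma al_ne_nil (cs : List Char) (h : cs ≠ []) : alOf cs ≠ [] := by
  have hN : 0 < cs.length := List.length_pos_of_ne_nil h
  have hmem : PySem.List.pyGetD cs ((0 : Nat) : Int) ' ' ∈ alOf cs := by
    rw [alOf, PySem.List.mem_sorted, PySem.Set.mem_ofList, PySem.List.pyGetD_natCast,
      List.getD_eq_getElem _ _ hN]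
    exact List.getElem_mem hN
  exact List.ne_nil_of_mem hmem

lemma colB_length (cs : List Char) (c : Char) (h : cs ≠ []) :
    (colB cs c).length = cs.length + 1 := by
  have hN : 1 ≤ cs.length := List.length_pos_of_ne_nil h
  rw [colB, List.cons_append, List.length_cons, List.length_append,
    List.length_map, PySem.List.length_pyRange_one]
  simp
  omega

lemma colB_getD (cs : List Char) (c : Char) (j : Nat) (h : cs ≠ []) (hj : j ≤ cs.length) :
    (colB cs c).getD j [] =
      if j = cs.length then '[' :: PySem.Int.toChars ((cs.length : Int) + 1) ++ [']']
      else if j = 0 then (if c = PySem.List.pyGetD cs 0 ' ' then "[1,2]".toList else "[1]".toList)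
      else if c = PySem.List.pyGetD cs (j : Int) ' ' then '[' :: PySem.Int.toChars ((j : Int) + 2) ++ [']']
      else "[]".toList := by
  have hN : 1 ≤ cs.length := List.length_pos_of_ne_nil h
  have hmid : ((PySem.List.pyRange 1 ((cs.length : Nat) : Int) 1).map (fun i =>
      if c = PySem.List.pyGetD cs i ' ' then '[' :: PySem.Int.toChars (i + 2) ++ [']'] else "[]".toList)).length
      = cs.length - 1 := by
    rw [List.length_map, PySem.List.length_pyRange_one]
    omega
  rw [colB, List.cons_append]
  by_cases hj0 : j = 0
  · subst hj0
    rw [List.getD_cons_zero, if_neg (show ¬((0:Nat) = cs.length) by omega), if_pos rfl]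
  · obtain ⟨k, rfl⟩ : ∃ k, j = k + 1 := ⟨j - 1, by omega⟩
    rw [List.getD_cons_succ, if_neg hj0]
    by_cases hjn : k + 1 = cs.length
    · rw [if_pos hjn]
      rw [List.getD_append_right _ _ _ _ (by rw [hmid]; omega)]
      rw [hmid]
      have hz : k - (cs.length - 1) = 0 := by omega
      rw [hz, List.getD_cons_zero]
    · rw [if_neg hjn]
      have hk : k < cs.length - 1 := by omega
      rw [List.getD_append _ _ _ _ (by rw [hmid]; omega)]
      rw [List.getD_eq_getElem _ _ (by rw [hmid]; omega), List.getElem_map, PySem.List.getElem_pyRange_one]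
      have : (1 : Int) + (k : Int) = ((k + 1 : Nat) : Int) := by push_cast; ring
      rw [this]

lemma rowsB_eq (cs : List Char) (h : cs ≠ []) :
    (nfsmbuildZip (colsB cs)).map (PySem.Chars.join [' '])
      = (PySem.List.pyRange 0 ((cs.length : Int) + 1) 1).map (rowB cs) := by
  have hN : 1 ≤ cs.length := List.length_pos_of_ne_nil h
  obtain ⟨a, al, hal⟩ : ∃ a al, alOf cs = a :: al := by
    cases hh : alOf cs with
    | nil => exact absurd hh (al_ne_nil cs h)
    | cons a al => exact ⟨a, al, rfl⟩
  have hcols : colsB cs = colB cs a :: (al.map (colB cs) ++ [List.replicate (cs.length + 1) "[]".toList]) := by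
    rw [colsB, hal]
    simp
  rw [hcols, zip_eq (cs.length + 1) _ _ (colB_length cs a h)]
  · rw [List.map_map]
    have hcast : ((cs.length : Int) + 1) = ((cs.length + 1 : Nat) : Int) := by push_cast; ring
    rw [hcast, PySem.List.pyRange_zero_nat, List.map_map]
    apply List.map_congr_left
    intro j hj
    rw [List.mem_range] at hj
    simp only [Function.comp]
    -- LHS: join of the j-th cell of every column (plus epsilon); RHS: rowB at j
    have hrepl : (List.replicate (cs.length + 1) "[]".toList).getD j [] = "[]".toList := by
      rw [List.getD_replicate _ (by omega)]
    have hmapged : (colB cs a :: (al.map (colB cs) ++ [List.replicate (cs.length + 1) "[]".toList])).map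
          (fun col => col.getD j (default : List Char))
        = ((alOf cs).map (fun c => (colB cs c).getD j [])) ++ ["[]".toList] := by
      rw [hal, List.map_cons, List.map_cons, List.map_append, List.map_map, List.map_singleton,
        show (default : List Char) = [] from rfl, hrepl]
      rfl
    rw [hmapged]
    rw [rowB]
    congr 1
    congr 1
    by_cases hjn : j = cs.length
    · subst hjn
      rw [if_pos rfl]
      apply List.map_congr_left
      intro c _
      rw [colB_getD cs c _ h (by omega), if_pos rfl]
    · rw [if_neg (by exact_mod_cast hjn)]
      by_cases hj0 : j = 0
      · subst hj0
        rw [if_pos (by norm_num : (((0:Nat)):Int) = 0)]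
        apply List.map_congr_left
        intro c _
        rw [colB_getD cs c 0 h (by omega), if_neg hjn, if_pos rfl]
      · rw [if_neg (by exact_mod_cast hj0)]
        apply List.map_congr_left
        intro c _
        rw [colB_getD cs c j h (by omega), if_neg hjn, if_neg hj0]
  · intro l hl
    rcases List.mem_append.mp hl with hl | hl
    · obtain ⟨c, _, rfl⟩ := List.mem_map.mp hl
      exact colB_length cs c h
    · rw [List.mem_singleton.mp hl]
      simp

lemma main_out (cs : List Char) : outA cs = outB cs := by
  by_cases h : cs = []
  · subst h; decide
  · have hsl : (PySem.List.pyRange 1 ((cs.length : Int) + 2) 1).length = cs.length + 1 := by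
      rw [PySem.List.length_pyRange_one]; omega
    simp only [outA, outB]
    rw [table_eq cs h]
    rw [foldl_out (PySem.Chars.join [' ']) '\n']
    have hmm : (((List.range (cs.length + 1)).map (predRow cs)).map (fun row => row.map fmtCell)).map
        (fun r => PySem.Chars.join [' '] r ++ ['\n'])
        = (((List.range (cs.length + 1)).map (predRow cs)).map
            (fun row => PySem.Chars.join [' '] (row.map fmtCell))).map (fun r => r ++ ['\n']) := by
      simp [List.map_map, Function.comp_def]
    rw [hmm]
    rw [flatten_join '\n' _ (by simp [List.range_succ])]
    rw [rows_eq cs h, ← rowsB_eq cs h]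
    rw [List.map_singleton, PySem.Chars.join_singleton, hsl]
    have h1 : (" ?\n\n".toList : List Char) = [' ', '?', '\n', '\n'] := rfl
    have h2 : ("\n\n".toList : List Char) = ['\n', '\n'] := rfl
    rw [h1, h2]
    push_cast
    simp [List.append_assoc]

-- ===== VERDICT (by name: the statement is the Claim_ definition above) =====
theorem nfsmbuild_spec : Claim_equal_nfsmbuild := by
  intro s _
  unfold Spec_nfsmbuild
  rw [nfsmbuild_eq, nfsmbuild_alt_eq, main_out]
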